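-- pv_equiv track=rewrite | github.com/nogjam/sandals | sandals/util.py | pascal_case_to_snake_case
-- ===== SOURCE A (Python) =====
-- def pascal_case_to_snake_case(s: str) -> str:
--     result: str = ""
--     cap_a: int = ord("A")
--     cap_z: int = ord("Z")
--     first: bool = True
--     for char in s:
--         if (d := ord(char)) >= cap_a and d <= cap_z:
--             if not first:
--                 result += "_"
--             result += char.lower()
--         else:
--             result += char
--         first = False
--     return result
-- ===== SOURCE B (Python) =====
-- import re
--
-- def pascal_case_to_snake_case(s: str) -> str:
--     return re.sub(
--         r"[A-Z]",
--         lambda m: m.group(0).lower() if m.start() == 0 else "_" + m.group(0).lower(),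
--         s,
--     )
-- ===== Notes on version B (the rewrite author's own statement) =====
-- stated objective: idiomatic
-- what changed: Replaces the explicit accumulator loop with a first-char flag by a single re.sub over [A-Z] whose replacement uses the match position to decide whether to prepend an underscore.
import Mathlib
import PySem

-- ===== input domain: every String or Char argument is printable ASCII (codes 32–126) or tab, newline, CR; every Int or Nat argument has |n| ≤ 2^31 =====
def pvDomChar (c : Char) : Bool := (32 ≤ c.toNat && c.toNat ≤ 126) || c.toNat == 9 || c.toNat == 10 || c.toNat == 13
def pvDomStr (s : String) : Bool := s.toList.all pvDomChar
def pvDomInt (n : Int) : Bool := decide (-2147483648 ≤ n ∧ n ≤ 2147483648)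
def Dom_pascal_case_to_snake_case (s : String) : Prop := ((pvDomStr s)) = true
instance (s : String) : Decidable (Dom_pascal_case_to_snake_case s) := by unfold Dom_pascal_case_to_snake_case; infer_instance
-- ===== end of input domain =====

-- B replaces A's accumulator loop with flag by a re.sub over [A-Z] deciding the underscore
-- from the match position (objective: idiomatic).

-- ===== PORT A =====
-- A's for-loop over the characters with accumulator `result` and flag `first`.
def pvAloop : List Char → List Char → Bool → List Char
  | [], res, _ => res
  | c :: cs, res, first =>
    if 65 ≤ c.toNat ∧ c.toNat ≤ 90 then
      pvAloop cs ((if first then res else res ++ ['_']) ++ [PySem.Chars.lowerChar c]) false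
    else
      pvAloop cs (res ++ [c]) false

def pascal_case_to_snake_case (s : String) : String :=
  String.mk (pvAloop s.toList [] true)

-- ===== PORT B =====
-- Source B's re.sub with the single-character pattern [A-Z]: each character is a potential
-- match at its own index, non-matching characters are copied unchanged; this per-position
-- substitution is exact for a one-character pattern. The lambda's replacement:
def pvBrepl (p : Int × Char) : List Char :=
  if 65 ≤ p.2.toNat ∧ p.2.toNat ≤ 90 then
    (if p.1 = 0 then [] else ['_']) ++ [PySem.Chars.lowerChar p.2]
  else
    [p.2]

def pascal_case_to_snake_case_alt (s : String) : String :=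
  String.mk ((PySem.List.enumerate s.toList 0).flatMap pvBrepl)

-- ===== PRECONDITION & SPEC =====
def Spec_pascal_case_to_snake_case (s : String) (out : String) : Prop := out = pascal_case_to_snake_case_alt s
instance (s : String) (out : String) : Decidable (Spec_pascal_case_to_snake_case s out) := by unfold Spec_pascal_case_to_snake_case; infer_instance

-- ===== CLAIM (what is proved, stated in full; the proofs are below) =====
def Claim_equal_pascal_case_to_snake_case : Prop := ∀ (s : String), Dom_pascal_case_to_snake_case s → Spec_pascal_case_to_snake_case s (pascal_case_to_snake_case s)

-- ===== LEMMAS AND PROOFS =====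

-- after the first character the flag is false and every index is ≥ 1
theorem pvAloop_false (cs : List Char) : ∀ (res : List Char) (n : Int), 1 ≤ n →
    pvAloop cs res false = res ++ (PySem.List.enumerate cs n).flatMap pvBrepl := by
  induction cs with
  | nil => intro res n _; simp [pvAloop, PySem.List.enumerate_nil]
  | cons c cs ih =>
    intro res n hn
    rw [PySem.List.enumerate_cons]
    by_cases h : 65 ≤ c.toNat ∧ c.toNat ≤ 90
    · simp only [pvAloop, if_pos h]
      rw [ih _ (n + 1) (by omega)]
      have hn0 : ¬ (n = 0) := by omega
      simp [pvBrepl, if_pos h, hn0]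
    · simp only [pvAloop, if_neg h]
      rw [ih _ (n + 1) (by omega)]
      simp [pvBrepl, if_neg h]

theorem pvAloop_eq (l : List Char) :
    pvAloop l [] true = (PySem.List.enumerate l 0).flatMap pvBrepl := by
  cases l with
  | nil => simp [pvAloop, PySem.List.enumerate_nil]
  | cons c cs =>
    rw [PySem.List.enumerate_cons]
    by_cases h : 65 ≤ c.toNat ∧ c.toNat ≤ 90
    · simp only [pvAloop, if_pos h]
      rw [pvAloop_false cs _ 1 le_rfl]
      simp [pvBrepl, if_pos h]
    · simp only [pvAloop, if_neg h]
      rw [pvAloop_false cs _ 1 le_rfl]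
      simp [pvBrepl, if_neg h]

-- ===== VERDICT (by name: the statement is the Claim_ definition above) =====
theorem pascal_case_to_snake_case_spec : Claim_equal_pascal_case_to_snake_case := by
  intro s _
  unfold Spec_pascal_case_to_snake_case pascal_case_to_snake_case pascal_case_to_snake_case_alt
  rw [pvAloop_eq]
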